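-- pv_equiv track=rewrite | github.com/bkane2/eta | core/resources/detect-open-ended-question.py | get_base_words
-- ===== SOURCE A (Python) =====
-- def get_base_words(ws, d):
--   """Given a list of words or features, reduce to a list of
--      base words by expanding features."""
--   ret = []
--   for w in ws:
--     if w in d:
--       ret += get_base_words(d[w], d) + [w]
--     else:
--       ret += [w]
--   return ret
-- ===== SOURCE B (Python) =====
-- def get_base_words(ws, d):
--   """Iterative explicit-stack DFS: tasks are either ('emit', word) or
--      ('list', words); children are emitted before their parent word."""
--   ret = []
--   stack = [(False, ws)]
--   while stack:
--     is_word, x = stack.pop()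
--     if is_word:
--       ret.append(x)
--     else:
--       for w in reversed(x):
--         stack.append((True, w))
--         if w in d:
--           stack.append((False, d[w]))
--   return ret
-- ===== Notes on version B (the rewrite author's own statement) =====
-- stated objective: alternative
-- what changed: Replaces A's recursive expansion with an iterative explicit-stack DFS (tasks are emit-word or process-list, pushed in reverse) that appends to one output list, so B uses no recursion at all.
import Mathlib
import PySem

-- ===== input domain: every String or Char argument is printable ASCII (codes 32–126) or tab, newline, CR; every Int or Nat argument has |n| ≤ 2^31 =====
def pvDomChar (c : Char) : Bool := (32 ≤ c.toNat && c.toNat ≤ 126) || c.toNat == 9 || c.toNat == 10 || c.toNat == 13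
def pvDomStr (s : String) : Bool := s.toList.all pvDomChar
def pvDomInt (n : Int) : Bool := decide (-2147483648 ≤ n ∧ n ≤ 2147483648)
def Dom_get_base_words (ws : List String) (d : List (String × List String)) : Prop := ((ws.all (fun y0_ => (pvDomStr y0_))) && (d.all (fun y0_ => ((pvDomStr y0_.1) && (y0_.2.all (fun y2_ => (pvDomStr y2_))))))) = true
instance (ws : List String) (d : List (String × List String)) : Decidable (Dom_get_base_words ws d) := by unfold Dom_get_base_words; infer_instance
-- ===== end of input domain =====

-- B replaces A's recursion by an iterative explicit-stack DFS (different decomposition, same cost);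
-- equivalence is proved on acyclic feature dictionaries (Pre_), where A returns without a RecursionError.

-- first-match lookup on the association list = Python's 'w in d' / 'd[w]' for a dict (exact: dict keys are
-- unique in Python, first match equals the only match)
def pvLookup (d : List (String × List String)) (w : String) : Option (List String) :=
  match d with
  | [] => none
  | (k, v) :: t => if k = w then some v else pvLookup t w

-- ===== PORT A =====
-- literal port of A's recursion; the fuel argument only makes the recursion total in Lean: on inputs
-- satisfying Pre_ (acyclic dictionary) the key-chain depth is at most d.length, so fuel is never exhausted
def gbwA (d : List (String × List String)) : Nat → List String → List String
  | 0, _ => []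
  | fuel + 1, ws =>
    ws.foldl (fun ret w =>
      match pvLookup d w with
      | some vs => ret ++ (gbwA d fuel vs ++ [w])
      | none => ret ++ [w]) []

def get_base_words (ws : List String) (d : List (String × List String)) : List String :=
  gbwA d (d.length + 1) ws

-- ===== PORT B =====
inductive PVTask
  | emit : String → PVTask
  | proc : List String → PVTask
deriving DecidableEq, Repr

-- the 'for w in reversed(x): push (True,w); if w in d: push (False,d[w])' loop of Source B
def pushRev (d : List (String × List String)) (ws : List String) (st : List PVTask) : List PVTask :=
  ws.foldr (fun w acc =>
    match pvLookup d w with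
    | some vs => PVTask.proc vs :: PVTask.emit w :: acc
    | none => PVTask.emit w :: acc) st

-- the while-loop of Source B: pop a task, emit a word or expand a list; fuel only makes it total in Lean
-- (on Pre_ inputs the loop pops are bounded by fuelB, proved below)
def runB (d : List (String × List String)) : Nat → List PVTask → List String → List String
  | 0, _, ret => ret
  | _ + 1, [], ret => ret
  | fuel + 1, PVTask.emit w :: st, ret => runB d fuel st (ret ++ [w])
  | fuel + 1, PVTask.proc ws :: st, ret => runB d fuel (pushRev d ws st) ret

def fuelB (ws : List String) (d : List (String × List String)) : Nat :=
  (ws.length + (d.map (fun p => p.2.length)).sum + 2) ^ (d.length + 3)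

def get_base_words_alt (ws : List String) (d : List (String × List String)) : List String :=
  runB d (fuelB ws d) [PVTask.proc ws] []

-- ===== PRECONDITION & SPEC =====
def pvKeys (d : List (String × List String)) : List String := d.map Prod.fst

def pvSuccs (d : List (String × List String)) (w : String) : List String :=
  (pvLookup d w).getD []

-- one Kahn round: adds every key all of whose key-successors are already ranked
def kahnStep (d : List (String × List String)) (acc : List String) : List String :=
  acc ++ (pvKeys d).filter (fun k => decide (∀ v ∈ pvSuccs d k, v ∈ pvKeys d → v ∈ acc))

def kahnIter (d : List (String × List String)) : Nat → List String
  | 0 => []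
  | n + 1 => kahnStep d (kahnIter d n)

-- Pre_ = no word of ws expands into a key-graph cycle of d, stated via the standard decidable
-- acyclicity characterisation (Kahn ranking: a key is ranked within d.length rounds iff no cycle is
-- reachable from it).  This is a shape condition on the inputs, independent of both ports.  Excluded
-- are exactly the inputs on which A recurses forever and dies with a RecursionError (and Source B loops).
def Pre_get_base_words (ws : List String) (d : List (String × List String)) : Prop :=
  ∀ w ∈ ws, w ∈ pvKeys d → w ∈ kahnIter d d.length

instance (ws : List String) (d : List (String × List String)) : Decidable (Pre_get_base_words ws d) := by
  unfold Pre_get_base_words; infer_instance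

def pvWitness_get_base_words : List String × (List (String × List String)) :=
  (["run", "x"], [("run", ["go", "went"]), ("went", ["w"])])

def Spec_get_base_words (ws : List String) (d : List (String × List String)) (out : List String) : Prop := out = get_base_words_alt ws d
instance (ws : List String) (d : List (String × List String)) (out : List String) : Decidable (Spec_get_base_words ws d out) := by unfold Spec_get_base_words; infer_instance

-- ===== CLAIM (what is proved, stated in full; the proofs are below) =====
def Claim_equal_get_base_words : Prop := ∀ (ws : List String) (d : List (String × List String)), Dom_get_base_words ws d → Pre_get_base_words ws d → Spec_get_base_words ws d (get_base_words ws d)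

-- ===== LEMMAS AND PROOFS =====

-- pops the machine spends on a 'proc ws' task, fueled by the Kahn rank bound
def costF (d : List (String × List String)) : Nat → List String → Nat
  | 0, _ => 0
  | n + 1, ws =>
    1 + (ws.map (fun w =>
      match pvLookup d w with
      | some vs => 1 + costF d n vs
      | none => 1)).sum

lemma costF_succ (d : List (String × List String)) (n : Nat) (ws : List String) :
    costF d (n + 1) ws = 1 + (ws.map (fun w =>
      match pvLookup d w with
      | some vs => 1 + costF d n vs
      | none => 1)).sum := rfl

lemma pushRev_nil (d : List (String × List String)) (st : List PVTask) :
    pushRev d [] st = st := rfl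

lemma pushRev_cons (d : List (String × List String)) (w : String) (t : List String)
    (st : List PVTask) :
    pushRev d (w :: t) st =
      (match pvLookup d w with
       | some vs => PVTask.proc vs :: PVTask.emit w :: pushRev d t st
       | none => PVTask.emit w :: pushRev d t st) := rfl

lemma runB_nil (d : List (String × List String)) (f : Nat) (ret : List String) :
    runB d f [] ret = ret := by
  cases f <;> simp [runB]

lemma gbwA_succ (d : List (String × List String)) (n : Nat) (ws : List String) :
    gbwA d (n + 1) ws = ws.flatMap (fun w =>
      match pvLookup d w with
      | some vs => gbwA d n vs ++ [w]
      | none => [w]) := by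
  suffices h : ∀ (l acc : List String),
      l.foldl (fun ret w =>
        match pvLookup d w with
        | some vs => ret ++ (gbwA d n vs ++ [w])
        | none => ret ++ [w]) acc
      = acc ++ l.flatMap (fun w =>
        match pvLookup d w with
        | some vs => gbwA d n vs ++ [w]
        | none => [w]) by
    simpa [gbwA] using h ws []
  intro l
  induction l with
  | nil => intro acc; simp
  | cons w t ih =>
    intro acc
    cases h : pvLookup d w <;> simp [h, ih, List.append_assoc]

lemma kahnIter_succ (d : List (String × List String)) (n : Nat) :
    kahnIter d (n + 1) = kahnIter d n ++
      (pvKeys d).filter (fun k => decide (∀ v ∈ pvSuccs d k, v ∈ pvKeys d → v ∈ kahnIter d n)) := rfl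

lemma kahn_mono (d : List (String × List String)) (n : Nat) {a : String}
    (h : a ∈ kahnIter d n) : a ∈ kahnIter d (n + 1) := by
  rw [kahnIter_succ]
  exact List.mem_append_left _ h

lemma rankProp (d : List (String × List String)) :
    ∀ n k, k ∈ kahnIter d (n + 1) → ∀ v ∈ pvSuccs d k, v ∈ pvKeys d → v ∈ kahnIter d n := by
  intro n
  induction n with
  | zero =>
    intro k hk v hv hvk
    rw [kahnIter_succ] at hk
    rcases List.mem_append.mp hk with h | h
    · simp [kahnIter] at h
    · exact of_decide_eq_true (List.mem_filter.mp h).2 v hv hvk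
  | succ m ih =>
    intro k hk v hv hvk
    rw [kahnIter_succ] at hk
    rcases List.mem_append.mp hk with h | h
    · exact kahn_mono d m (ih k h v hv hvk)
    · exact of_decide_eq_true (List.mem_filter.mp h).2 v hv hvk

lemma lookup_isSome_mem (d : List (String × List String)) (w : String)
    (h : (pvLookup d w).isSome) : w ∈ pvKeys d := by
  induction d with
  | nil => simp [pvLookup] at h
  | cons p t ih =>
    by_cases hk : p.1 = w
    · simp [pvKeys, hk]
    · simp only [pvLookup, hk, if_false] at h
      exact List.mem_cons_of_mem _ (ih h)

lemma lookup_len (d : List (String × List String)) (w : String) (vs : List String)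
    (h : pvLookup d w = some vs) : vs.length ≤ (d.map (fun p => p.2.length)).sum := by
  induction d with
  | nil => simp [pvLookup] at h
  | cons p t ih =>
    by_cases hk : p.1 = w
    · simp only [pvLookup, hk, if_true] at h
      obtain rfl : p.2 = vs := by injection h
      simp
    · simp only [pvLookup, hk, if_false] at h
      have := ih h
      simp
      omega

lemma gbwA_one_nokey (d : List (String × List String)) (n : Nat) (ws : List String)
    (h : ∀ w ∈ ws, pvLookup d w = none) : gbwA d (n + 1) ws = ws := by
  rw [gbwA_succ]
  induction ws with
  | nil => simp
  | cons w t ih =>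
    have hw := h w (by simp)
    simp [hw, ih (fun x hx => h x (List.mem_cons_of_mem _ hx))]

lemma procSim (d : List (String × List String)) :
    ∀ n, ∀ ws st ret f,
      (∀ w ∈ ws, (pvLookup d w).isSome → w ∈ kahnIter d n) →
      runB d (f + costF d (n + 1) ws) (PVTask.proc ws :: st) ret
        = runB d f st (ret ++ gbwA d (n + 1) ws) := by
  intro n
  induction n with
  | zero =>
    intro ws st ret f hyp
    have hkey : ∀ w ∈ ws, pvLookup d w = none := by
      intro w hw
      cases h : pvLookup d w with
      | none => rfl
      | some vs => exact absurd (hyp w hw (by simp [h])) (by simp [kahnIter])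
    have inner : ∀ (l : List String), (∀ w ∈ l, pvLookup d w = none) →
        ∀ st ret f,
        runB d (f + (l.map (fun w =>
            match pvLookup d w with
            | some vs => 1 + costF d 0 vs
            | none => 1)).sum) (pushRev d l st) ret
          = runB d f st (ret ++ l) := by
      intro l
      induction l with
      | nil => intro _ st ret f; simp [pushRev_nil]
      | cons w t iht =>
        intro hk st ret f
        have hw := hk w (by simp)
        have ht : ∀ x ∈ t, pvLookup d x = none := fun x hx => hk x (List.mem_cons_of_mem _ hx)
        rw [pushRev_cons, hw]
        simp only [List.map_cons, List.sum_cons, hw]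
        have he : f + (1 + (t.map (fun w =>
            match pvLookup d w with
            | some vs => 1 + costF d 0 vs
            | none => 1)).sum) = (f + (t.map (fun w =>
            match pvLookup d w with
            | some vs => 1 + costF d 0 vs
            | none => 1)).sum) + 1 := by omega
        rw [he]
        show runB d _ (PVTask.emit w :: pushRev d t st) ret = _
        rw [runB]
        rw [iht ht]
        simp
    rw [costF_succ]
    have he : f + (1 + (ws.map (fun w =>
        match pvLookup d w with
        | some vs => 1 + costF d 0 vs
        | none => 1)).sum) = (f + (ws.map (fun w =>
        match pvLookup d w with
        | some vs => 1 + costF d 0 vs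
        | none => 1)).sum) + 1 := by omega
    rw [he, runB, inner ws hkey, gbwA_one_nokey d 0 ws hkey]
  | succ m ih =>
    intro ws st ret f hyp
    have inner : ∀ (l : List String), (∀ w ∈ l, (pvLookup d w).isSome → w ∈ kahnIter d (m + 1)) →
        ∀ st ret f,
        runB d (f + (l.map (fun w =>
            match pvLookup d w with
            | some vs => 1 + costF d (m + 1) vs
            | none => 1)).sum) (pushRev d l st) ret
          = runB d f st (ret ++ l.flatMap (fun w =>
            match pvLookup d w with
            | some vs => gbwA d (m + 1) vs ++ [w]
            | none => [w])) := by
      intro l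
      induction l with
      | nil => intro _ st ret f; simp [pushRev_nil]
      | cons w t iht =>
        intro hl st ret f
        have ht : ∀ x ∈ t, (pvLookup d x).isSome → x ∈ kahnIter d (m + 1) :=
          fun x hx hs => hl x (List.mem_cons_of_mem _ hx) hs
        cases hw : pvLookup d w with
        | none =>
          rw [pushRev_cons, hw]
          simp only [List.map_cons, List.sum_cons, List.flatMap_cons, hw]
          have he : f + (1 + (t.map (fun w =>
              match pvLookup d w with
              | some vs => 1 + costF d (m + 1) vs
              | none => 1)).sum) = (f + (t.map (fun w =>
              match pvLookup d w with
              | some vs => 1 + costF d (m + 1) vs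
              | none => 1)).sum) + 1 := by omega
          rw [he]
          show runB d _ (PVTask.emit w :: pushRev d t st) ret = _
          rw [runB]
          rw [iht ht]
          simp
        | some vs =>
          have hvs : ∀ v ∈ vs, (pvLookup d v).isSome → v ∈ kahnIter d m := by
            intro v hv hs
            exact rankProp d m w (hl w (by simp) (by simp [hw])) v
              (by simp [pvSuccs, hw, hv]) (lookup_isSome_mem d v hs)
          rw [pushRev_cons, hw]
          simp only [List.map_cons, List.sum_cons, List.flatMap_cons, hw]
          have he : f + ((1 + costF d (m + 1) vs) + (t.map (fun w =>
              match pvLookup d w with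
              | some vs => 1 + costF d (m + 1) vs
              | none => 1)).sum) = (((f + (t.map (fun w =>
              match pvLookup d w with
              | some vs => 1 + costF d (m + 1) vs
              | none => 1)).sum) + 1) + costF d (m + 1) vs) := by omega
          rw [he, ih vs (PVTask.emit w :: pushRev d t st) ret _ hvs]
          show runB d _ (PVTask.emit w :: pushRev d t st) _ = _
          rw [runB]
          rw [iht ht]
          simp
    rw [costF_succ]
    have he : f + (1 + (ws.map (fun w =>
        match pvLookup d w with
        | some vs => 1 + costF d (m + 1) vs
        | none => 1)).sum) = (f + (ws.map (fun w =>
        match pvLookup d w with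
        | some vs => 1 + costF d (m + 1) vs
        | none => 1)).sum) + 1 := by omega
    rw [he, runB, inner ws hyp, gbwA_succ]

lemma cost_le (d : List (String × List String)) (T : Nat)
    (hv : ∀ w vs, pvLookup d w = some vs → vs.length ≤ T) :
    ∀ n ws, ws.length ≤ T → costF d n ws ≤ (T + 2) ^ (n + 1) := by
  intro n
  induction n with
  | zero => intro ws _; simp [costF]
  | succ m ihm =>
    intro ws hws
    rw [costF_succ]
    have hpt : ∀ x ∈ ws.map (fun w =>
        match pvLookup d w with
        | some vs => 1 + costF d m vs
        | none => 1), x ≤ 1 + (T + 2) ^ (m + 1) := by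
      intro x hx
      obtain ⟨w, hw, rfl⟩ := List.mem_map.mp hx
      cases h : pvLookup d w with
      | none => simp
      | some vs =>
        have := ihm vs (hv w vs h)
        show 1 + costF d m vs ≤ 1 + (T + 2) ^ (m + 1)
        omega
    have hsum := List.sum_le_card_nsmul _ _ hpt
    rw [smul_eq_mul, List.length_map] at hsum
    have hx : (T + 2) ≤ (T + 2) ^ (m + 1) := Nat.le_self_pow (Nat.succ_ne_zero m) _
    have hpow : (T + 2) ^ (m + 2) = (T + 2) * (T + 2) ^ (m + 1) := by ring
    nlinarith [hsum, hws, hx]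

-- ===== VERDICT (by name: the statement is the Claim_ definition above) =====
theorem get_base_words_spec : Claim_equal_get_base_words := by
  intro ws d _ hpre
  show get_base_words ws d = get_base_words_alt ws d
  unfold get_base_words get_base_words_alt fuelB
  have hv : ∀ w vs, pvLookup d w = some vs →
      vs.length ≤ ws.length + (d.map (fun p => p.2.length)).sum :=
    fun w vs h => le_trans (lookup_len d w vs h) (by omega)
  have hcost : costF d (d.length + 1) ws ≤
      (ws.length + (d.map (fun p => p.2.length)).sum + 2) ^ (d.length + 3) := by
    calc costF d (d.length + 1) ws
        ≤ (ws.length + (d.map (fun p => p.2.length)).sum + 2) ^ (d.length + 2) :=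
          cost_le d _ hv (d.length + 1) ws (by omega)
      _ ≤ (ws.length + (d.map (fun p => p.2.length)).sum + 2) ^ (d.length + 3) :=
          Nat.pow_le_pow_right (by omega) (by omega)
  have hyp : ∀ w ∈ ws, (pvLookup d w).isSome → w ∈ kahnIter d d.length :=
    fun w hw hs => hpre w hw (lookup_isSome_mem d w hs)
  have hsim := procSim d d.length ws [] []
    ((ws.length + (d.map (fun p => p.2.length)).sum + 2) ^ (d.length + 3)
      - costF d (d.length + 1) ws) hyp
  rw [Nat.sub_add_cancel hcost, runB_nil, List.nil_append] at hsim
  exact hsim.symm
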